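-- pv_equiv track=rewrite | github.com/adhishnanda/emotion-adaptive-multimodal-cbt-assistant | src/nlg/llm_engine.py | _summarize_recent_history
-- ===== SOURCE A (Python) =====
-- from typing import List, Dict, Optional, Tuple
--
-- def _summarize_recent_history(history: List[Dict[str, str]]) -> str:
--     """
--     Create a brief summary of the last few conversation turns.
--
--     Args:
--         history: List of previous messages
--
--     Returns:
--         Short summary string (1-2 lines)
--     """
--     if not history:
--         return "This is the start of the conversation."
--
--     # Get the last user message and last assistant reply
--     last_user = None
--     last_assistant = None
--
--     for msg in reversed(history):
--         role = msg.get("role", "")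
--         if role == "user" and last_user is None:
--             last_user = msg.get("content", "")
--         elif role == "assistant" and last_assistant is None:
--             last_assistant = msg.get("content", "")
--
--         if last_user and last_assistant:
--             break
--
--     summary_parts = []
--     if last_assistant:
--         # Truncate if too long
--         assistant_preview = last_assistant[:100] + "..." if len(last_assistant) > 100 else last_assistant
--         summary_parts.append(f"Last assistant response: {assistant_preview}")
--
--     if last_user:
--         user_preview = last_user[:80] + "..." if len(last_user) > 80 else last_user
--         summary_parts.append(f"Last user message: {user_preview}")
--
--     if not summary_parts:
--         return "Previous conversation context is available."
--
--     return " | ".join(summary_parts)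
-- ===== SOURCE B (Python) =====
-- from typing import List, Dict
--
--
-- def _preview(text: str, limit: int) -> str:
--     """Truncate text to `limit` characters, adding '...' when truncated."""
--     return text[:limit] + "..." if len(text) > limit else text
--
--
-- def _summarize_recent_history(history: List[Dict[str, str]]) -> str:
--     if not history:
--         return "This is the start of the conversation."
--
--     # Forward pass: overwrite on every match, so each variable ends up
--     # holding the content of the LAST message with that role.
--     last_user = None
--     last_assistant = None
--     for msg in history:
--         role = msg.get("role", "")
--         if role == "user":
--             last_user = msg.get("content", "")
--         elif role == "assistant":
--             last_assistant = msg.get("content", "")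
--
--     a_part = f"Last assistant response: {_preview(last_assistant, 100)}" if last_assistant else None
--     u_part = f"Last user message: {_preview(last_user, 80)}" if last_user else None
--
--     if a_part and u_part:
--         return a_part + " | " + u_part
--     if a_part:
--         return a_part
--     if u_part:
--         return u_part
--     return "Previous conversation context is available."
-- ===== Notes on version B (the rewrite author's own statement) =====
-- stated objective: simpler
-- what changed: Replaces the reverse scan with early break and is-None guards by a single forward pass that unconditionally overwrites last_user/last_assistant, and replaces the summary-parts list plus join by a shared _preview helper and direct case analysis on the two optional parts.
import Mathlib
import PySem

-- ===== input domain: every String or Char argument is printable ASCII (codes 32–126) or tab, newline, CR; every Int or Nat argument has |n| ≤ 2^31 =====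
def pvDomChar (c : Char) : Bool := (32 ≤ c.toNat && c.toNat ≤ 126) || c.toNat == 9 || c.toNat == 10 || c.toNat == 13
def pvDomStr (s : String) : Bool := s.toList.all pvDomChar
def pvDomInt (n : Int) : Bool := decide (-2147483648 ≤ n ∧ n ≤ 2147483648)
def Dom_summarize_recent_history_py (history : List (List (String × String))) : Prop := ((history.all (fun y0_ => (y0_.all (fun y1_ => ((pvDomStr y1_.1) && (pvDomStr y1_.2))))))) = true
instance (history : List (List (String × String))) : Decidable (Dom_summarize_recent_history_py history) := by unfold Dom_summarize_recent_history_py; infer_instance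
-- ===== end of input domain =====

-- B replaces A's reverse scan with early break by a forward overwrite pass and
-- direct case analysis on the two optional summary parts (objective: simpler).


-- ===== PORT A =====
-- msg.get(k, "") on a Python dict (assoc list, first match)
def pvMsgGet (msg : List (String × String)) (k : String) : String :=
  PySem.Dict.getD (PySem.Dict.mk msg) k ""

-- Python truthiness of an Optional[str]
def pvTruthy : Option String → Bool
  | none => false
  | some s => s != ""

-- A's reverse loop: fill each still-None slot, break once both are truthy.
-- The elif guard is exact as an independent if: a role equal to "user" is never "assistant".
def pvALoop : List (List (String × String)) → Option String → Option String →
    Option String × Option String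
  | [], lu, la => (lu, la)
  | msg :: rest, lu, la =>
    let role := pvMsgGet msg "role"
    let lu' := if role = "user" ∧ lu = none then some (pvMsgGet msg "content") else lu
    let la' := if role = "assistant" ∧ la = none then some (pvMsgGet msg "content") else la
    if pvTruthy lu' ∧ pvTruthy la' then (lu', la') else pvALoop rest lu' la'

def summarize_recent_history_py (history : List (List (String × String))) : String :=
  match history with
  | [] => "This is the start of the conversation."
  | _ :: _ =>
    let st := pvALoop history.reverse none none
    let last_user := st.1
    let last_assistant := st.2
    let summary_parts : List String :=
      (match last_assistant with
       | some s =>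
         if s != "" then
           ["Last assistant response: " ++
             (if PySem.Str.len s > 100 then PySem.Str.slice s none (some 100) ++ "..." else s)]
         else []
       | none => []) ++
      (match last_user with
       | some s =>
         if s != "" then
           ["Last user message: " ++
             (if PySem.Str.len s > 80 then PySem.Str.slice s none (some 80) ++ "..." else s)]
         else []
       | none => [])
    if summary_parts = [] then "Previous conversation context is available."
    else PySem.Str.join " | " summary_parts

-- ===== PORT B =====
-- _preview(text, limit)
def pvPreview (text : String) (limit : Nat) : String :=
  if PySem.Str.len text > limit then PySem.Str.slice text none (some (limit : Int)) ++ "..." else text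

-- B's forward loop: unconditionally overwrite on every matching role
def pvBLoop : List (List (String × String)) → Option String → Option String →
    Option String × Option String
  | [], lu, la => (lu, la)
  | msg :: rest, lu, la =>
    let role := pvMsgGet msg "role"
    if role = "user" then pvBLoop rest (some (pvMsgGet msg "content")) la
    else if role = "assistant" then pvBLoop rest lu (some (pvMsgGet msg "content"))
    else pvBLoop rest lu la

def summarize_recent_history_py_alt (history : List (List (String × String))) : String :=
  match history with
  | [] => "This is the start of the conversation."
  | _ :: _ =>
    let st := pvBLoop history none none
    let a_part : Option String :=
      match st.2 with
      | some s => if s != "" then some ("Last assistant response: " ++ pvPreview s 100) else none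
      | none => none
    let u_part : Option String :=
      match st.1 with
      | some s => if s != "" then some ("Last user message: " ++ pvPreview s 80) else none
      | none => none
    match a_part, u_part with
    | some a, some u => a ++ " | " ++ u
    | some a, none => a
    | none, some u => u
    | none, none => "Previous conversation context is available."

-- ===== PRECONDITION & SPEC =====
def Spec_summarize_recent_history_py (history : List (List (String × String))) (out : String) : Prop := out = summarize_recent_history_py_alt history
instance (history : List (List (String × String))) (out : String) : Decidable (Spec_summarize_recent_history_py history out) := by unfold Spec_summarize_recent_history_py; infer_instance

-- ===== CLAIM (what is proved, stated in full; the proofs are below) =====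
def Claim_equal_summarize_recent_history_py : Prop := ∀ (history : List (List (String × String))), Dom_summarize_recent_history_py history → Spec_summarize_recent_history_py history (summarize_recent_history_py history)

-- ===== LEMMAS AND PROOFS =====

-- content of the first message in xs whose role is r
def pvFirstR (r : String) (xs : List (List (String × String))) : Option String :=
  (xs.find? (fun m => pvMsgGet m "role" = r)).map (fun m => pvMsgGet m "content")

theorem pvFirstR_cons (r : String) (m : List (String × String))
    (rest : List (List (String × String))) :
    pvFirstR r (m :: rest) =
      if pvMsgGet m "role" = r then some (pvMsgGet m "content") else pvFirstR r rest := by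
  by_cases h : pvMsgGet m "role" = r
  · simp [pvFirstR, h]
  · simp [pvFirstR, h]

theorem pvALoop_eq (xs : List (List (String × String))) :
    ∀ lu la, pvALoop xs lu la =
      (lu.or (pvFirstR "user" xs), la.or (pvFirstR "assistant" xs)) := by
  induction xs with
  | nil => intro lu la; simp [pvALoop, pvFirstR]
  | cons m rest ih =>
    intro lu la
    simp only [pvALoop]
    rw [pvFirstR_cons, pvFirstR_cons]
    by_cases hu : pvMsgGet m "role" = "user"
    · have hna : ¬ pvMsgGet m "role" = "assistant" := by rw [hu]; decide
      rw [if_pos hu, if_neg hna]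
      have h2 : ¬ (pvMsgGet m "role" = "assistant" ∧ la = none) := fun h => hna h.1
      cases lu with
      | none =>
        rw [if_pos (show pvMsgGet m "role" = "user" ∧ (none : Option String) = none from ⟨hu, rfl⟩), if_neg h2]
        split
        · rename_i hb
          cases la with
          | none => simp [pvTruthy] at hb
          | some t => simp
        · rw [ih]; simp
      | some s =>
        have h1 : ¬ (pvMsgGet m "role" = "user" ∧ (some s : Option String) = none) := by simp
        rw [if_neg h1, if_neg h2]
        split
        · rename_i hb
          cases la with
          | none => simp [pvTruthy] at hb
          | some t => simp
        · rw [ih]; simp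
    · have h1 : ¬ (pvMsgGet m "role" = "user" ∧ lu = none) := fun h => hu h.1
      by_cases ha : pvMsgGet m "role" = "assistant"
      · rw [if_neg hu, if_pos ha, if_neg h1]
        cases la with
        | none =>
          rw [if_pos (show pvMsgGet m "role" = "assistant" ∧ (none : Option String) = none from ⟨ha, rfl⟩)]
          split
          · rename_i hb
            cases lu with
            | none => simp [pvTruthy] at hb
            | some s => simp
          · rw [ih]; simp
        | some t =>
          have h2 : ¬ (pvMsgGet m "role" = "assistant" ∧ (some t : Option String) = none) := by
            simp
          rw [if_neg h2]
          split
          · rename_i hb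
            cases lu with
            | none => simp [pvTruthy] at hb
            | some s => simp
          · rw [ih]; simp
      · have h2 : ¬ (pvMsgGet m "role" = "assistant" ∧ la = none) := fun h => ha h.1
        rw [if_neg hu, if_neg ha, if_neg h1, if_neg h2]
        split
        · rename_i hb
          obtain ⟨hb1, hb2⟩ := hb
          cases lu with
          | none => simp [pvTruthy] at hb1
          | some s =>
            cases la with
            | none => simp [pvTruthy] at hb2
            | some t => simp
        · rw [ih]

theorem pvFirstR_append (r : String) (xs ys : List (List (String × String))) :
    pvFirstR r (xs ++ ys) = (pvFirstR r xs).or (pvFirstR r ys) := by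
  simp only [pvFirstR, List.find?_append]
  cases xs.find? (fun m => pvMsgGet m "role" = r) <;> simp

theorem pvBLoop_eq (xs : List (List (String × String))) :
    ∀ lu la, pvBLoop xs lu la =
      ((pvFirstR "user" xs.reverse).or lu, (pvFirstR "assistant" xs.reverse).or la) := by
  induction xs with
  | nil => intro lu la; simp [pvBLoop, pvFirstR]
  | cons m rest ih =>
    intro lu la
    simp only [pvBLoop, List.reverse_cons, pvFirstR_append]
    by_cases hu : pvMsgGet m "role" = "user"
    · have hna : ¬ pvMsgGet m "role" = "assistant" := by rw [hu]; decide
      rw [if_pos hu, ih]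
      have h1 : pvFirstR "user" [m] = some (pvMsgGet m "content") := by simp [pvFirstR, hu]
      have h2 : pvFirstR "assistant" [m] = none := by simp [pvFirstR, hna]
      rw [h1, h2, Option.or_assoc, Option.or_none]
      simp
    · by_cases ha : pvMsgGet m "role" = "assistant"
      · rw [if_neg hu, if_pos ha, ih]
        have h1 : pvFirstR "user" [m] = none := by simp [pvFirstR, hu]
        have h2 : pvFirstR "assistant" [m] = some (pvMsgGet m "content") := by simp [pvFirstR, ha]
        rw [h1, h2, Option.or_none, Option.or_assoc]
        simp
      · rw [if_neg hu, if_neg ha, ih]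
        have h1 : pvFirstR "user" [m] = none := by simp [pvFirstR, hu]
        have h2 : pvFirstR "assistant" [m] = none := by simp [pvFirstR, ha]
        rw [h1, h2, Option.or_none, Option.or_none]

theorem pvJoin_two (a b : String) : PySem.Str.join " | " [a, b] = a ++ " | " ++ b := by
  apply String.toList_inj.mp
  rw [PySem.Str.toList_join]
  simp [PySem.Chars.join_cons_cons, PySem.Chars.join_singleton, String.toList_append]

theorem pvJoin_one (a : String) : PySem.Str.join " | " [a] = a := by
  apply String.toList_inj.mp
  rw [PySem.Str.toList_join]
  simp [PySem.Chars.join_singleton]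

theorem pvPreview_100 (s : String) :
    (if PySem.Str.len s > 100 then PySem.Str.slice s none (some 100) ++ "..." else s) =
      pvPreview s 100 := by
  simp [pvPreview]

theorem pvPreview_80 (s : String) :
    (if PySem.Str.len s > 80 then PySem.Str.slice s none (some 80) ++ "..." else s) =
      pvPreview s 80 := by
  simp [pvPreview]

-- ===== VERDICT (by name: the statement is the Claim_ definition above) =====
theorem summarize_recent_history_py_spec : Claim_equal_summarize_recent_history_py := by
  intro history _
  unfold Spec_summarize_recent_history_py
  unfold summarize_recent_history_py summarize_recent_history_py_alt
  cases history with
  | nil => rfl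
  | cons m rest =>
    simp only [pvALoop_eq, pvBLoop_eq, Option.none_or, Option.or_none]
    set fu := pvFirstR "user" (m :: rest).reverse with hfu
    set fa := pvFirstR "assistant" (m :: rest).reverse with hfa
    cases fa with
    | none =>
      cases fu with
      | none => rfl
      | some s =>
        by_cases hs : s = ""
        · simp [hs]
        · simp only [hs, bne_iff_ne, ne_eq, not_false_iff, if_true, List.nil_append,
            pvPreview_80]
          simp [pvJoin_one]
    | some s =>
      by_cases hs : s = ""
      · cases fu with
        | none => simp [hs]
        | some t =>
          by_cases ht : t = ""
          · simp [hs, ht]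
          · simp only [hs, ht, bne_iff_ne, ne_eq, not_true, if_false, List.nil_append,
              pvPreview_80]
            simp [pvJoin_one]
      · cases fu with
        | none =>
          simp only [hs, bne_iff_ne, ne_eq, not_false_iff, if_true, List.append_nil,
            pvPreview_100]
          simp [pvJoin_one]
        | some t =>
          by_cases ht : t = ""
          · simp only [hs, ht, bne_iff_ne, ne_eq, not_false_iff, if_true, not_true, if_false,
              List.append_nil, pvPreview_100]
            simp [pvJoin_one]
          · simp only [hs, ht, bne_iff_ne, ne_eq, not_false_iff, if_true, pvPreview_100,
              pvPreview_80, List.cons_append, List.nil_append]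
            simp [pvJoin_two]
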